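-- pv_equiv track=rewrite | github.com/julianaviola98/puzzles | my_solutions/puzzle2.py | chooseTime
-- ===== SOURCE A (Python) =====
-- def chooseTime(times, ystart, yend):
--
--     rcount = 0
--     maxcount = 0
--     time = 0
--
--     #Range through the times computing a running count of celebrities
--     for t in times:
--         if ystart <= t[0] and t[0] < yend:
--             if t[1] == 'start':
--                 rcount = rcount + 1
--             elif t[1] == 'end':
--                 rcount = rcount - 1
--             if rcount > maxcount:
--                 maxcount = rcount
--                 time = t[0]
--
--     return maxcount, time
-- ===== SOURCE B (Python) =====
-- def chooseTime(times, ystart, yend):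
--     # filter to the window, mapping each event to (time, delta)
--     deltas = [(t[0], 1 if t[1] == 'start' else -1 if t[1] == 'end' else 0)
--               for t in times if ystart <= t[0] < yend]
--     # running counts (prefix sums of the deltas)
--     running = []
--     c = 0
--     for _, d in deltas:
--         c += d
--         running.append(c)
--     maxcount = max(running, default=0)
--     if maxcount <= 0:
--         return 0, 0
--     # first moment the peak is reached
--     time = next(x for (x, _), r in zip(deltas, running) if r == maxcount)
--     return maxcount, time
-- ===== Notes on version B (the rewrite author's own statement) =====
-- stated objective: alternative
-- what changed: Replaces A's single interleaved fold (running count + running max + time tracked together) with three separate passes: filter/map to (time, delta) pairs, build the prefix-count list, then take its max and the first position attaining it.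
import Mathlib
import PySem

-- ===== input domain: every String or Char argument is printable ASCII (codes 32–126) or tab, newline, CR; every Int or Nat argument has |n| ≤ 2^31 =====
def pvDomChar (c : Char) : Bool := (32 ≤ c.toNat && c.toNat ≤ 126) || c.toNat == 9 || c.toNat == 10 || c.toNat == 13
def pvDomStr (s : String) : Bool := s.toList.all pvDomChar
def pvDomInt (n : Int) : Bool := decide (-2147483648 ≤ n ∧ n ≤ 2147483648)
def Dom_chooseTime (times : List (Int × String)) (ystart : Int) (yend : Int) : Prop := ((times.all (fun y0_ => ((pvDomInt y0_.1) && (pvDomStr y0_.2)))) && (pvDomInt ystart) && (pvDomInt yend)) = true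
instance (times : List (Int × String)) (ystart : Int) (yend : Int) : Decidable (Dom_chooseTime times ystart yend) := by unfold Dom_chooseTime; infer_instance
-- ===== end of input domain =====

-- ===== PORT A =====
-- B builds the filtered (time, delta) list, its prefix counts, and a separate
-- first-argmax scan instead of A's interleaved fold; same cost, different decomposition.
def chooseTime (times : List (Int × String)) (ystart : Int) (yend : Int) : Int × Int :=
  let s := times.foldl (fun (st : Int × Int × Int) t =>
    if ystart ≤ t.1 ∧ t.1 < yend then
      let rcount := if t.2 = "start" then st.1 + 1 else if t.2 = "end" then st.1 - 1 else st.1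
      if rcount > st.2.1 then (rcount, rcount, t.1) else (rcount, st.2.1, st.2.2)
    else st) (0, 0, 0)
  (s.2.1, s.2.2)

-- ===== PORT B =====
-- 'next(x for (x, _), r in zip(deltas, running) if r == maxcount)' of Source B
def findPeak : List ((Int × Int) × Int) → Int → Option Int
  | [], _ => none
  | ((x, _), r) :: rest, M => if r = M then some x else findPeak rest M

def chooseTime_alt (times : List (Int × String)) (ystart : Int) (yend : Int) : Int × Int :=
  let deltas := (times.filter (fun t => decide (ystart ≤ t.1 ∧ t.1 < yend))).map
      (fun t => (t.1, if t.2 = "start" then (1 : Int) else if t.2 = "end" then (-1 : Int) else 0))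
  let running := (deltas.foldl (fun (st : Int × List Int) p =>
      (st.1 + p.2, st.2 ++ [st.1 + p.2])) (0, [])).2
  let maxcount := (PySem.List.max? running (fun x => x)).getD 0
  if maxcount ≤ 0 then (0, 0)
  else (maxcount, (findPeak (deltas.zip running) maxcount).getD 0)

-- ===== PRECONDITION & SPEC =====
def Spec_chooseTime (times : List (Int × String)) (ystart : Int) (yend : Int) (out : Int × Int) : Prop := out = chooseTime_alt times ystart yend
instance (times : List (Int × String)) (ystart : Int) (yend : Int) (out : Int × Int) : Decidable (Spec_chooseTime times ystart yend out) := by unfold Spec_chooseTime; infer_instance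

-- ===== CLAIM (what is proved, stated in full; the proofs are below) =====
def Claim_equal_chooseTime : Prop := ∀ (times : List (Int × String)) (ystart : Int) (yend : Int), Dom_chooseTime times ystart yend → Spec_chooseTime times ystart yend (chooseTime times ystart yend)

-- ===== LEMMAS AND PROOFS =====

-- prefix sums of the delta list, starting from count c
def altPrefix : Int → List (Int × Int) → List Int
  | _, [] => []
  | c, p :: rest => (c + p.2) :: altPrefix (c + p.2) rest

-- first time in ds whose prefix count (from c) equals M
def findTime : List (Int × Int) → Int → Int → Option Int
  | [], _, _ => none
  | p :: rest, c, M => if c + p.2 = M then some p.1 else findTime rest (c + p.2) M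

-- the inner body of A's fold, on (time, delta) pairs
def aStep (st : Int × Int × Int) (p : Int × Int) : Int × Int × Int :=
  if st.1 + p.2 > st.2.1 then (st.1 + p.2, st.1 + p.2, p.1) else (st.1 + p.2, st.2.1, st.2.2)

theorem altPrefix_foldl (ds : List (Int × Int)) : ∀ (c : Int) (acc : List Int),
    (ds.foldl (fun (st : Int × List Int) p => (st.1 + p.2, st.2 ++ [st.1 + p.2])) (c, acc)).2
      = acc ++ altPrefix c ds := by
  induction ds with
  | nil => intro c acc; simp [altPrefix]
  | cons p rest ih =>
      intro c acc
      simp only [List.foldl_cons, altPrefix, ih, List.append_assoc, List.singleton_append]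

theorem findPeak_zip (ds : List (Int × Int)) : ∀ (c M : Int),
    findPeak (ds.zip (altPrefix c ds)) M = findTime ds c M := by
  induction ds with
  | nil => intro c M; simp [altPrefix, findPeak, findTime]
  | cons p rest ih =>
      intro c M
      simp only [altPrefix, List.zip_cons_cons, findPeak, findTime, ih]

theorem findTime_isSome (ds : List (Int × Int)) : ∀ (c M : Int),
    M ∈ altPrefix c ds → (findTime ds c M).isSome := by
  induction ds with
  | nil => intro c M h; simp [altPrefix] at h
  | cons p rest ih =>
      intro c M h
      simp only [altPrefix, List.mem_cons] at h
      unfold findTime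
      by_cases he : c + p.2 = M
      · simp [he]
      · rcases h with h | h
        · exact absurd h.symm he
        · simp only [if_neg he]
          exact ih _ _ h

theorem foldl_max_comm (t : List Int) : ∀ (a b : Int),
    t.foldl max (max a b) = max a (t.foldl max b) := by
  induction t with
  | nil => intro a b; rfl
  | cons x rest ih =>
      intro a b
      simp only [List.foldl_cons, max_assoc, ih]

-- key characterisation of A's fold over the filtered delta list
theorem aFold_char (ds : List (Int × Int)) : ∀ (c m tm : Int),
    (ds.foldl aStep (c, m, tm)).2 =
      ((altPrefix c ds).foldl max m,
        if m < (altPrefix c ds).foldl max m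
          then (findTime ds c ((altPrefix c ds).foldl max m)).getD tm else tm) := by
  induction ds with
  | nil => intro c m tm; simp [altPrefix]
  | cons p rest ih =>
      intro c m tm
      rw [List.foldl_cons]
      simp only [altPrefix, List.foldl_cons, findTime]
      by_cases hgt : c + p.2 > m
      · rw [show aStep (c, m, tm) p = (c + p.2, c + p.2, p.1) from by
          simp [aStep, hgt]]
        rw [ih]
        rw [max_eq_right (le_of_lt hgt)]
        have hMc' : c + p.2 ≤ (altPrefix (c + p.2) rest).foldl max (c + p.2) :=
          (PySem.List.le_foldl_max _ _).1
        have hmM : m < (altPrefix (c + p.2) rest).foldl max (c + p.2) :=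
          lt_of_lt_of_le hgt hMc'
        rw [if_pos hmM]
        by_cases heq : c + p.2 = (altPrefix (c + p.2) rest).foldl max (c + p.2)
        · rw [if_pos heq, if_neg (by omega)]
          simp
        · rw [if_neg heq]
          have hMr : (altPrefix (c + p.2) rest).foldl max (c + p.2) ∈ altPrefix (c + p.2) rest := by
            rcases PySem.List.foldl_max_mem (altPrefix (c + p.2) rest) (c + p.2) with h | h
            · exact absurd h.symm heq
            · exact h
          have hs := findTime_isSome rest (c + p.2) _ hMr
          rw [if_pos (by omega)]
          rcases Option.isSome_iff_exists.mp hs with ⟨v, hv⟩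
          simp [hv]
      · rw [show aStep (c, m, tm) p = (c + p.2, m, tm) from by
          simp [aStep, hgt]]
        rw [ih]
        rw [max_eq_left (by omega)]
        by_cases hmM : m < (altPrefix (c + p.2) rest).foldl max m
        · rw [if_pos hmM, if_pos hmM, if_neg (by omega)]
        · rw [if_neg hmM, if_neg hmM]

-- A's fold over times equals the fold of aStep over the filtered, mapped delta list
theorem chooseTime_filter (times : List (Int × String)) (ystart yend : Int) : ∀ (st : Int × Int × Int),
    times.foldl (fun (st : Int × Int × Int) t =>
      if ystart ≤ t.1 ∧ t.1 < yend then
        let rcount := if t.2 = "start" then st.1 + 1 else if t.2 = "end" then st.1 - 1 else st.1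
        if rcount > st.2.1 then (rcount, rcount, t.1) else (rcount, st.2.1, st.2.2)
      else st) st
    = ((times.filter (fun t => decide (ystart ≤ t.1 ∧ t.1 < yend))).map
        (fun t => (t.1, if t.2 = "start" then (1 : Int) else if t.2 = "end" then (-1 : Int) else 0))).foldl aStep st := by
  induction times with
  | nil => intro st; simp
  | cons t rest ih =>
      intro st
      by_cases hp : ystart ≤ t.1 ∧ t.1 < yend
      · simp only [List.foldl_cons, List.filter_cons, hp, decide_true, and_self, if_true,
          List.map_cons, ih]
        congr 1
        unfold aStep
        by_cases h1 : t.2 = "start"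
        · simp [h1]
        · by_cases h2 : t.2 = "end"
          · simp [h2, sub_eq_add_neg]
          · simp [h1, h2]
      · simp only [List.foldl_cons, List.filter_cons, if_neg hp, ih]
        have : decide (ystart ≤ t.1 ∧ t.1 < yend) = false := by simp [hp]
        simp [this]

-- ===== VERDICT (by name: the statement is the Claim_ definition above) =====
theorem chooseTime_spec : Claim_equal_chooseTime := by
  intro times ystart yend _
  unfold Spec_chooseTime chooseTime chooseTime_alt
  rw [chooseTime_filter]
  set ds := (times.filter (fun t => decide (ystart ≤ t.1 ∧ t.1 < yend))).map
      (fun t => (t.1, if t.2 = "start" then (1 : Int) else if t.2 = "end" then (-1 : Int) else 0)) with hds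
  dsimp only
  rw [aFold_char ds 0 0 0, altPrefix_foldl ds 0 [], List.nil_append, findPeak_zip]
  cases hR : altPrefix 0 ds with
  | nil => simp [PySem.List.max?]
  | cons x t =>
      rw [PySem.List.max?_id_cons]
      simp only [Option.getD_some, List.foldl_cons]
      have hfold : t.foldl max (max 0 x) = max 0 (t.foldl max x) := foldl_max_comm t 0 x
      rw [show max (0:Int) x = max 0 x from rfl, hfold]
      by_cases hm : t.foldl max x ≤ 0
      · rw [if_pos hm]
        rw [max_eq_left hm]
        simp
      · rw [if_neg hm]
        rw [max_eq_right (by omega)]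
        rw [if_pos (by omega)]
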